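-- pv_equiv track=rewrite | github.com/Attila-F/Codility | lessons/GenomicRangeQuery.py | solution
-- ===== SOURCE A (Python) =====
-- IMPACT_FACTOR = {'A': 1,
--                  'C': 2,
--                  'G': 3,
--                  'T': 4}
--
-- def get_min_impact(impacts, limit):
--     # Iterate through the last occurrences of the 4 impact factors in increasing order
--     for i, val in enumerate(impacts):
--         # If the impact factor has occurred before the end of the query, return that value.
--         if val >= 0 and val <= limit:
--             return i+1
--
-- def solution(S, P, Q):
--     # Generate suffix min index array to solve in O(N+M)
--
--     # Starting from the last element of S,
--     # store the index of the last occurrence of that impact factor.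
--
--     # A running list to track the impact factors
--     last_imp_idx = [-1, -1, -1, -1]
--     # The suffix list to store the last occurrences
--     suf_min = [None] * len(S)
--
--     # Iterate backwards through N nucleoids and store the last index of each nucleoid
--     for i in range(len(S), 0, -1):
--         # Map the nucleoid character to impact int
--         imp = IMPACT_FACTOR[S[i-1]]
--         # Set the element corresponding to the current impact value to the current index
--         # -1 means that value hasn't been encountered yet.
--         last_imp_idx[imp-1] = i-1
--         # Store a copy of the array.
--         suf_min[i-1] = last_imp_idx.copy()
--
--     # The return array
--     ret = [None] * len(P)
--
--     # Iterate through M queries and get the smallest impact factor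
--     for i in range(len(P)):
--         ret[i] = get_min_impact(impacts=suf_min[P[i]], limit=Q[i])
--
--     return ret
-- ===== SOURCE B (Python) =====
-- # B: prefix-count arrays per nucleotide instead of per-position suffix snapshots.
--
-- def _first_present(pref, p, hi):
--     # smallest impact factor whose count over [p, hi) is positive
--     for k, c in enumerate('ACGT'):
--         if pref[c][hi] - pref[c][p] > 0:
--             return k + 1
--     return None
--
-- def solution(S, P, Q):
--     n = len(S)
--     pref = {}
--     for c in 'ACGT':
--         run = [0]
--         t = 0
--         for ch in S:
--             if ch == c:
--                 t += 1
--             run.append(t)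
--         pref[c] = run
--     out = []
--     for p, q in zip(P, Q):
--         hi = max(0, min(q + 1, n))
--         out.append(_first_present(pref, p, hi))
--     return out
-- ===== Notes on version B (the rewrite author's own statement) =====
-- stated objective: alternative
-- what changed: Replaces A's backward pass that stores a copy of the 4-entry last-occurrence array at every position (queried by scanning for the first index-in-range entry) with four cumulative prefix-count arrays built forward, each query answered by the first nucleotide whose count difference over the clamped range is positive.
-- outside the precondition, e.g. on solution('AC', [-1], [1]): A returns [2], B returns [None]
import Mathlib
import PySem

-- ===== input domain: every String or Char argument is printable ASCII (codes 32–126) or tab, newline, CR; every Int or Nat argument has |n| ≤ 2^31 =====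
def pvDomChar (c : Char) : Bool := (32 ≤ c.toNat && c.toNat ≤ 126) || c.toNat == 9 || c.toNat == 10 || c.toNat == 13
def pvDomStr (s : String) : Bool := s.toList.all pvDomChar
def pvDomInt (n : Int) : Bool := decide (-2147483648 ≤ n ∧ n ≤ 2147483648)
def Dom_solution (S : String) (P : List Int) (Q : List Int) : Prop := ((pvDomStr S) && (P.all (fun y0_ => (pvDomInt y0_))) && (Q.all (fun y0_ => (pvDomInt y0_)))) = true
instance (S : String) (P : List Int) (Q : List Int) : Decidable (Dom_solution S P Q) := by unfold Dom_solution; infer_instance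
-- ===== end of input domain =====

-- B replaces A's per-position suffix snapshots (a copy of the 4-entry last-occurrence
-- array stored at every index) by four prefix-count arrays queried by subtraction;
-- same O(N+M) shape, different data structure (objective: alternative).

-- ===== PORT A =====
def pvIMPACT_FACTOR : PySem.Dict Char Int :=
  PySem.Dict.ofList [('A', 1), ('C', 2), ('G', 3), ('T', 4)]

-- 'for i, val in enumerate(impacts): if val >= 0 and val <= limit: return i+1'
def pvGmiGo : List Int → Int → Int → Option Int
  | [], _, _ => none
  | v :: rest, limit, i => if 0 ≤ v ∧ v ≤ limit then some (i + 1) else pvGmiGo rest limit (i + 1)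

def get_min_impact (impacts : List Int) (limit : Int) : Option Int := pvGmiGo impacts limit 0

-- one iteration of A's backward loop over 'range(len(S), 0, -1)'
def pvStepA (SL : List Char) (st : List Int × List (Option (List Int))) (i : Int) :
    List Int × List (Option (List Int)) :=
  let imp := pvIMPACT_FACTOR.getD (PySem.List.pyGetD SL (i - 1) ' ') 0
  let last' := PySem.List.pySetD st.1 (imp - 1) (i - 1)
  (last', PySem.List.pySetD st.2 (i - 1) (some last'))

def solution (S : String) (P : List Int) (Q : List Int) : List (Option Int) :=
  let SL := S.toList
  let st := (PySem.List.pyRange (SL.length : Int) 0 (-1)).foldl (pvStepA SL)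
      ([-1, -1, -1, -1], List.replicate SL.length none)
  (PySem.List.pyRange 0 (P.length : Int) 1).foldl
    (fun ret i =>
      PySem.List.pySetD ret i
        (get_min_impact
          ((PySem.List.pyGetD st.2 (PySem.List.pyGetD P i 0) none).getD [])
          (PySem.List.pyGetD Q i 0)))
    (List.replicate P.length none)

-- ===== PORT B =====
-- the prefix-count array for one nucleotide (Source B's inner 'run' loop)
def pvRun (SL : List Char) (c : Char) : List Int :=
  (SL.foldl
    (fun (st : Int × List Int) ch =>
      let t := st.1 + (if ch = c then 1 else 0); (t, st.2 ++ [t]))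
    (0, [0])).2

-- Source B's _first_present: first impact k+1 whose count over [p, hi) is positive
def pvFirstPresent (pref : Char → List Int) (p hi : Int) : List Char → Int → Option Int
  | [], _ => none
  | c :: rest, k =>
      if 0 < PySem.List.pyGetD (pref c) hi 0 - PySem.List.pyGetD (pref c) p 0
      then some (k + 1) else pvFirstPresent pref p hi rest (k + 1)

def solution_alt (S : String) (P : List Int) (Q : List Int) : List (Option Int) :=
  let SL := S.toList
  let n : Int := SL.length
  (P.zip Q).map (fun pq =>
    let hi := max 0 (min (pq.2 + 1) n)
    pvFirstPresent (pvRun SL) pq.1 hi ['A', 'C', 'G', 'T'] 0)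

-- ===== PRECONDITION & SPEC =====
-- Pre_ excludes inputs where A raises (a non-ACGT character: KeyError; P[i] ≥ len(S) or
-- P[i] < -len(S) or len(Q) < len(P): IndexError) and the inputs with -len(S) ≤ P[i] < 0,
-- where A returns a value only through Python's negative-index wraparound, outside the
-- problem's natural domain of queries 0 ≤ P[i] < len(S).
def Pre_solution (S : String) (P : List Int) (Q : List Int) : Prop :=
  S.toList.all (fun c => c = 'A' || c = 'C' || c = 'G' || c = 'T') = true ∧
  (∀ p ∈ P, 0 ≤ p ∧ p < (S.toList.length : Int)) ∧
  P.length ≤ Q.length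
instance (S : String) (P : List Int) (Q : List Int) : Decidable (Pre_solution S P Q) := by
  unfold Pre_solution; infer_instance

def pvWitness_solution : String × List Int × List Int := ("GACT", [0, 1, 3, 2], [3, 1, 9, -1])

def Spec_solution (S : String) (P : List Int) (Q : List Int) (out : List (Option Int)) : Prop :=
  out = solution_alt S P Q
instance (S : String) (P : List Int) (Q : List Int) (out : List (Option Int)) :
    Decidable (Spec_solution S P Q out) := by unfold Spec_solution; infer_instance

-- ===== CLAIM (what is proved, stated in full; the proofs are below) =====
def Claim_equal_solution : Prop := ∀ (S : String) (P : List Int) (Q : List Int),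
  Dom_solution S P Q → Pre_solution S P Q → Spec_solution S P Q (solution S P Q)

-- ===== LEMMAS AND PROOFS =====

-- first index i with j ≤ i < m and SL[i] = c, else -1 (what A's last_imp_idx entry holds)
def pvFi (SL : List Char) (c : Char) (j m : Nat) : Int :=
  if h : j < m then (if SL.getD j ' ' = c then (j : Int) else pvFi SL c (j + 1) m) else -1
termination_by m - j

lemma pvFi_unfold (SL : List Char) (c : Char) (j m : Nat) :
    pvFi SL c j m =
      if j < m then (if SL.getD j ' ' = c then (j : Int) else pvFi SL c (j + 1) m) else -1 := by
  rw [pvFi]; split_ifs <;> rfl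

def pvLspec (SL : List Char) (j : Nat) : List Int :=
  [pvFi SL 'A' j SL.length, pvFi SL 'C' j SL.length, pvFi SL 'G' j SL.length, pvFi SL 'T' j SL.length]

def pvSufSpec (SL : List Char) (m : Nat) : List (Option (List Int)) :=
  (List.range SL.length).map (fun j => if m ≤ j then some (pvLspec SL j) else none)

def pvCnt (SL : List Char) (c : Char) : Int := (SL.countP (fun ch => decide (ch = c)) : Int)

-- fi case analysis: either no occurrence (value -1) or the least occurrence index
lemma pvFi_cases (SL : List Char) (c : Char) (m : Nat) :
    ∀ k j, m - j ≤ k →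
      (pvFi SL c j m = -1 ∧ ∀ i, j ≤ i → i < m → SL.getD i ' ' ≠ c) ∨
      (∃ i : Nat, pvFi SL c j m = (i : Int) ∧ j ≤ i ∧ i < m ∧ SL.getD i ' ' = c ∧
        ∀ i', j ≤ i' → i' < i → SL.getD i' ' ' ≠ c) := by
  intro k
  induction k with
  | zero =>
    intro j hk
    left
    constructor
    · rw [pvFi_unfold]; simp [Nat.not_lt.mpr (by omega : m ≤ j)]
    · intro i h1 h2; omega
  | succ k ih =>
    intro j hk
    by_cases h : j < m
    · rw [pvFi_unfold, if_pos h]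
      by_cases hc : SL.getD j ' ' = c
      · rw [if_pos hc]
        right
        exact ⟨j, rfl, le_refl j, h, hc, fun i' h1 h2 => absurd (lt_of_le_of_lt h1 h2) (lt_irrefl j)⟩
      · rw [if_neg hc]
        rcases ih (j + 1) (by omega) with ⟨hv, hno⟩ | ⟨i, hv, h1, h2, hocc, hmin⟩
        · left
          refine ⟨hv, fun i hji him => ?_⟩
          rcases Nat.eq_or_lt_of_le hji with rfl | hlt
          · exact hc
          · exact hno i hlt him
        · right
          refine ⟨i, hv, by omega, h2, hocc, fun i' hji' hi' => ?_⟩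
          rcases Nat.eq_or_lt_of_le hji' with rfl | hlt
          · exact hc
          · exact hmin i' hlt hi'
    · left
      constructor
      · rw [pvFi_unfold]; simp [h]
      · intro i h1 h2; omega

lemma pvCnt_nil (c : Char) : pvCnt [] c = 0 := rfl

lemma pvCnt_cons (ch : Char) (l : List Char) (c : Char) :
    pvCnt (ch :: l) c = (if ch = c then 1 else 0) + pvCnt l c := by
  simp only [pvCnt, List.countP_cons, decide_eq_true_eq]
  push_cast
  split_ifs <;> ring

lemma pvRun_go (c : Char) : ∀ (SL : List Char) (t0 : Int) (acc : List Int),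
    (SL.foldl
      (fun (st : Int × List Int) ch =>
        let t := st.1 + (if ch = c then 1 else 0); (t, st.2 ++ [t]))
      (t0, acc)).2
    = acc ++ (List.range SL.length).map (fun i => t0 + pvCnt (SL.take (i + 1)) c) := by
  intro SL
  induction SL with
  | nil => intro t0 acc; simp
  | cons ch tl ih =>
    intro t0 acc
    simp only [List.foldl_cons]
    rw [ih, List.length_cons, List.range_succ_eq_map, List.map_cons, List.map_map,
      List.append_assoc, List.singleton_append]
    congr 1
    congr 1
    · simp [pvCnt_cons, pvCnt_nil]
    · apply List.map_congr_left
      intro i _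
      simp only [Function.comp_apply, List.take_succ_cons, pvCnt_cons]
      ring

-- the run array is the prefix-count table
lemma pvRun_spec (SL : List Char) (c : Char) :
    pvRun SL c = (List.range (SL.length + 1)).map (fun i => pvCnt (SL.take i) c) := by
  unfold pvRun
  rw [pvRun_go]
  rw [List.range_succ_eq_map, List.map_cons, List.map_map]
  simp [pvCnt_nil]

lemma pvRun_getD (SL : List Char) (c : Char) (i : Int) (h0 : 0 ≤ i) (h1 : i ≤ (SL.length : Int)) :
    PySem.List.pyGetD (pvRun SL c) i 0 = pvCnt (SL.take i.toNat) c := by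
  rw [pvRun_spec]
  rw [PySem.List.pyGetD_eq_getElem _ 0 h0 (by simp; omega)]
  simp

-- positive count difference ⟺ an occurrence in [a, b)
lemma pvCnt_diff_pos (SL : List Char) (c : Char) (a b : Nat) :
    0 < pvCnt (SL.take b) c - pvCnt (SL.take a) c ↔
      ∃ i : Nat, a ≤ i ∧ i < b ∧ i < SL.length ∧ SL.getD i ' ' = c := by
  by_cases hab : a ≤ b
  · have hb : b = a + (b - a) := by omega
    rw [hb, List.take_add]
    unfold pvCnt
    rw [List.countP_append]
    push_cast
    constructor
    · intro hlt
      have hpos : 0 < ((SL.drop a).take (b - a)).countP (fun ch => decide (ch = c)) := by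
        omega
      rw [List.countP_pos_iff] at hpos
      obtain ⟨x, hx, hxc⟩ := hpos
      rw [List.mem_iff_getElem] at hx
      obtain ⟨k, hk, hkx⟩ := hx
      have hseglen : k < min (b - a) (SL.length - a) := by
        simpa [List.length_take, List.length_drop] using hk
      refine ⟨a + k, by omega, by omega, by omega, ?_⟩
      have hgk : ((SL.drop a).take (b - a))[k] = SL[a + k]'(by omega) := by
        rw [List.getElem_take, List.getElem_drop]
      rw [List.getD_eq_getElem SL ' ' (by omega), ← hgk, hkx]
      simpa using hxc
    · rintro ⟨i, hai, hib, hin, hocc⟩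
      have hocc' : SL[i] = c := by
        rwa [List.getD_eq_getElem SL ' ' hin] at hocc
      have hpos : 0 < ((SL.drop a).take (b - a)).countP (fun ch => decide (ch = c)) := by
        rw [List.countP_pos_iff]
        refine ⟨SL[i], ?_, by simp [hocc']⟩
        rw [List.mem_iff_getElem]
        refine ⟨i - a, (by simp [List.length_take, List.length_drop]; omega), ?_⟩
        rw [List.getElem_take, List.getElem_drop]
        congr 1
        omega
      omega
  · constructor
    · intro hlt
      exfalso
      have hsub : (SL.take b).Sublist (SL.take a) := by
        have htb : SL.take b = (SL.take a).take b := by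
          rw [List.take_take]; congr 1; omega
        rw [htb]
        exact List.take_sublist _ _
      have hle := @List.Sublist.countP_le _ (fun ch => decide (ch = c)) _ _ hsub
      unfold pvCnt at hlt
      omega
    · rintro ⟨i, hai, hib, _, _⟩
      omega

-- per-character condition equivalence
lemma pvCond_iff (SL : List Char) (c : Char) (p q : Int) (hp0 : 0 ≤ p)
    (hpn : p < (SL.length : Int)) :
    (0 ≤ pvFi SL c p.toNat SL.length ∧ pvFi SL c p.toNat SL.length ≤ q) ↔
      (0 < PySem.List.pyGetD (pvRun SL c) (max 0 (min (q + 1) (SL.length : Int))) 0 -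
           PySem.List.pyGetD (pvRun SL c) p 0) := by
  have h1 : 0 ≤ max 0 (min (q + 1) (SL.length : Int)) := le_max_left _ _
  have h2 : max 0 (min (q + 1) (SL.length : Int)) ≤ (SL.length : Int) := by omega
  rw [pvRun_getD _ _ _ h1 h2, pvRun_getD _ _ _ hp0 (by omega), pvCnt_diff_pos]
  rcases pvFi_cases SL c SL.length SL.length p.toNat (by omega) with
    ⟨hv, hno⟩ | ⟨i0, hv, hj, him, hocc, hmin⟩
  · rw [hv]
    constructor
    · intro h; exact absurd h.1 (by norm_num)
    · rintro ⟨i, ha, hb, hc, hd⟩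
      exact absurd hd (hno i ha hc)
  · rw [hv]
    constructor
    · rintro ⟨_, hle⟩
      exact ⟨i0, hj, by omega, him, hocc⟩
    · rintro ⟨i, ha, hb, hc, hd⟩
      refine ⟨Int.natCast_nonneg i0, ?_⟩
      have hni : ¬ i < i0 := fun hlt => hmin i ha hlt hd
      omega

-- per-query equivalence
lemma pvQuery_eq (SL : List Char) (p q : Int) (hp0 : 0 ≤ p) (hpn : p < (SL.length : Int)) :
    get_min_impact (pvLspec SL p.toNat) q =
      pvFirstPresent (pvRun SL) p (max 0 (min (q + 1) (SL.length : Int))) ['A', 'C', 'G', 'T'] 0 := by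
  have hA := pvCond_iff SL 'A' p q hp0 hpn
  have hC := pvCond_iff SL 'C' p q hp0 hpn
  have hG := pvCond_iff SL 'G' p q hp0 hpn
  have hT := pvCond_iff SL 'T' p q hp0 hpn
  simp only [get_min_impact, pvLspec, pvGmiGo, pvFirstPresent]
  simp only [hA, hC, hG, hT]

lemma pvFi_none (SL : List Char) (c : Char) (j m : Nat) (h : m ≤ j) : pvFi SL c j m = -1 := by
  rw [pvFi_unfold, if_neg (by omega)]

lemma pvFi_hit (SL : List Char) {c : Char} {m : Nat} (hm : m < SL.length)
    (h : SL.getD m ' ' = c) : pvFi SL c m SL.length = (m : Int) := by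
  rw [pvFi_unfold, if_pos hm, if_pos h]

lemma pvFi_miss (SL : List Char) {c : Char} {m : Nat} (hm : m < SL.length)
    (h : SL.getD m ' ' ≠ c) : pvFi SL c m SL.length = pvFi SL c (m + 1) SL.length := by
  rw [pvFi_unfold, if_pos hm, if_neg h]

lemma pvSufSpec_set (SL : List Char) (m : Nat) :
    PySem.List.pySetD (pvSufSpec SL (m + 1)) (m : Int) (some (pvLspec SL m)) = pvSufSpec SL m := by
  rw [PySem.List.pySetD_natCast]
  apply List.ext_getElem
  · simp [pvSufSpec]
  · intro j hj1 hj2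
    have hjn : j < SL.length := by simpa [pvSufSpec] using hj2
    rw [List.getElem_set]
    by_cases hjm : m = j
    · subst hjm
      simp [pvSufSpec]
    · rw [if_neg hjm]
      simp only [pvSufSpec, List.getElem_map, List.getElem_range]
      split_ifs with h1 h2 <;> first | rfl | omega

lemma pvStepA_spec (SL : List Char) (m : Nat) (hm : m < SL.length)
    (hc : SL[m] = 'A' ∨ SL[m] = 'C' ∨ SL[m] = 'G' ∨ SL[m] = 'T') :
    pvStepA SL (pvLspec SL (m + 1), pvSufSpec SL (m + 1)) ((m : Int) + 1) =
      (pvLspec SL m, pvSufSpec SL m) := by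
  have hgd : SL.getD m ' ' = SL[m] := List.getD_eq_getElem SL ' ' hm
  simp only [pvStepA]
  rw [show ((m : Int) + 1) - 1 = (m : Int) from by ring]
  rw [PySem.List.pyGetD_natCast]
  have hlast : PySem.List.pySetD (pvLspec SL (m + 1))
      (pvIMPACT_FACTOR.getD (SL.getD m ' ') 0 - 1) (m : Int) = pvLspec SL m := by
    rcases hc with h | h | h | h <;> rw [hgd, h]
    · rw [show pvIMPACT_FACTOR.getD 'A' 0 - 1 = ((0 : Nat) : Int) from by decide,
        PySem.List.pySetD_natCast]
      unfold pvLspec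
      rw [pvFi_hit SL hm (c := 'A') (by rw [hgd, h]),
        pvFi_miss SL hm (c := 'C') (by rw [hgd, h]; decide),
        pvFi_miss SL hm (c := 'G') (by rw [hgd, h]; decide),
        pvFi_miss SL hm (c := 'T') (by rw [hgd, h]; decide)]
      rfl
    · rw [show pvIMPACT_FACTOR.getD 'C' 0 - 1 = ((1 : Nat) : Int) from by decide,
        PySem.List.pySetD_natCast]
      unfold pvLspec
      rw [pvFi_hit SL hm (c := 'C') (by rw [hgd, h]),
        pvFi_miss SL hm (c := 'A') (by rw [hgd, h]; decide),
        pvFi_miss SL hm (c := 'G') (by rw [hgd, h]; decide),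
        pvFi_miss SL hm (c := 'T') (by rw [hgd, h]; decide)]
      rfl
    · rw [show pvIMPACT_FACTOR.getD 'G' 0 - 1 = ((2 : Nat) : Int) from by decide,
        PySem.List.pySetD_natCast]
      unfold pvLspec
      rw [pvFi_hit SL hm (c := 'G') (by rw [hgd, h]),
        pvFi_miss SL hm (c := 'A') (by rw [hgd, h]; decide),
        pvFi_miss SL hm (c := 'C') (by rw [hgd, h]; decide),
        pvFi_miss SL hm (c := 'T') (by rw [hgd, h]; decide)]
      rfl
    · rw [show pvIMPACT_FACTOR.getD 'T' 0 - 1 = ((3 : Nat) : Int) from by decide,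
        PySem.List.pySetD_natCast]
      unfold pvLspec
      rw [pvFi_hit SL hm (c := 'T') (by rw [hgd, h]),
        pvFi_miss SL hm (c := 'A') (by rw [hgd, h]; decide),
        pvFi_miss SL hm (c := 'C') (by rw [hgd, h]; decide),
        pvFi_miss SL hm (c := 'G') (by rw [hgd, h]; decide)]
      rfl
  rw [hlast, pvSufSpec_set SL m]

-- A's backward fold computes pvSufSpec
lemma pvFoldA (SL : List Char) (hS : ∀ c ∈ SL, c = 'A' ∨ c = 'C' ∨ c = 'G' ∨ c = 'T') :
    ∀ m : Nat, m ≤ SL.length →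
      (PySem.List.pyRange (m : Int) 0 (-1)).foldl (pvStepA SL) (pvLspec SL m, pvSufSpec SL m) =
        (pvLspec SL 0, pvSufSpec SL 0) := by
  intro m
  induction m with
  | zero =>
    intro _
    rw [show ((0 : Nat) : Int) = 0 from rfl, PySem.List.pyRange_neg_one_eq_nil (by norm_num)]
    rfl
  | succ m ih =>
    intro hm1
    have hm : m < SL.length := by omega
    rw [show ((m + 1 : Nat) : Int) = (m : Int) + 1 from by push_cast; ring]
    rw [PySem.List.pyRange_neg_one_cons (by omega : (0 : Int) < (m : Int) + 1)]
    rw [List.foldl_cons]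
    rw [show (m : Int) + 1 - 1 = (m : Int) from by ring]
    rw [pvStepA_spec SL m hm (hS SL[m] (List.getElem_mem hm))]
    exact ih (by omega)

lemma pvLspec_top (SL : List Char) : pvLspec SL SL.length = [-1, -1, -1, -1] := by
  unfold pvLspec
  rw [pvFi_none _ _ _ _ le_rfl, pvFi_none _ _ _ _ le_rfl, pvFi_none _ _ _ _ le_rfl,
    pvFi_none _ _ _ _ le_rfl]

lemma pvSufSpec_top (SL : List Char) :
    pvSufSpec SL SL.length = List.replicate SL.length none := by
  unfold pvSufSpec
  apply List.ext_getElem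
  · simp
  · intro j hj1 hj2
    have hjn : j < SL.length := by simpa using hj1
    simp only [List.getElem_map, List.getElem_range, List.getElem_replicate]
    rw [if_neg (by omega)]

lemma pvSetAppendCons {α : Type} (as : List α) (b : α) (bs : List α) (v : α) :
    (as ++ b :: bs).set as.length v = as ++ v :: bs := by
  induction as with
  | nil => rfl
  | cons x xs ih => simp [ih]

-- A's output-filling fold
lemma pvFillFold {α : Type} (g : Int → α) (d : α) :
    ∀ (n m : Nat), n ≤ m →
      (PySem.List.pyRange 0 (n : Int) 1).foldl
          (fun ret i => PySem.List.pySetD ret i (g i)) (List.replicate m d) =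
        (List.range n).map (fun j : Nat => g (j : Int)) ++ List.replicate (m - n) d := by
  intro n
  induction n with
  | zero =>
    intro m _
    rw [show ((0 : Nat) : Int) = 0 from rfl, PySem.List.pyRange_one_eq_nil le_rfl]
    simp
  | succ n ih =>
    intro m hnm
    rw [show ((n + 1 : Nat) : Int) = (n : Int) + 1 from by push_cast; ring]
    rw [PySem.List.pyRange_one_succ_right (Int.natCast_nonneg n)]
    rw [List.foldl_append, ih m (by omega)]
    simp only [List.foldl_cons, List.foldl_nil]
    rw [PySem.List.pySetD_natCast]
    rw [show m - n = (m - (n + 1)) + 1 from by omega, List.replicate_succ]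
    have hset := pvSetAppendCons ((List.range n).map fun j : Nat => g (j : Int)) d
      (List.replicate (m - (n + 1)) d) (g (n : Int))
    rw [show ((List.range n).map fun j : Nat => g (j : Int)).length = n from by simp] at hset
    rw [hset]
    simp [List.range_succ]

-- ===== VERDICT (by name: the statement is the Claim_ definition above) =====
theorem solution_spec : Claim_equal_solution := by
  intro S P Q _ hpre
  obtain ⟨hS0, hP, hPQ⟩ := hpre
  have hS : ∀ c ∈ S.toList, c = 'A' ∨ c = 'C' ∨ c = 'G' ∨ c = 'T' := by
    intro c hc
    have := List.all_eq_true.mp hS0 c hc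
    simp at this
    tauto
  unfold Spec_solution solution solution_alt
  dsimp only
  have h1 := pvFoldA S.toList hS S.toList.length le_rfl
  rw [pvLspec_top, pvSufSpec_top] at h1
  rw [h1]
  dsimp only
  rw [pvFillFold _ _ P.length P.length le_rfl]
  simp only [Nat.sub_self, List.replicate_zero, List.append_nil]
  apply List.ext_getElem
  · simp [List.length_zip]
    omega
  · intro j hj1 hj2
    have hjP : j < P.length := by simpa using hj1
    have hjQ : j < Q.length := by omega
    simp only [List.getElem_map, List.getElem_range, List.getElem_zip]
    rw [PySem.List.pyGetD_natCast P, PySem.List.pyGetD_natCast Q]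
    rw [List.getD_eq_getElem P 0 hjP, List.getD_eq_getElem Q 0 hjQ]
    have hp := hP P[j] (List.getElem_mem hjP)
    rw [PySem.List.pyGetD_eq_getElem _ none hp.1 (by have h2 := hp.2; simp [pvSufSpec] at h2 ⊢; omega)]
    have hlt : (P[j]).toNat < S.toList.length := by omega
    simp only [pvSufSpec, List.getElem_map, List.getElem_range]
    rw [if_pos (Nat.zero_le _)]
    simp only [Option.getD_some]
    exact pvQuery_eq S.toList P[j] Q[j] hp.1 hp.2
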